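-- pv_equiv track=rewrite | github.com/danterusdev/flex-lang | lang.py | expand_macro
-- ===== SOURCE A (Python) =====
-- def expand_macro(tokens, macro_start, macro_end, bindings):
--     expanded = []
--     location = macro_start
--
--     start_repeat = -1
--     repeat_count = 0
--     repeat_max_count = -1
--
--     while location < macro_end:
--         token = tokens[location]
--
--         if token[0] and token[0][0] == '%':
--             expanded.append((bindings[token[0][1:]][repeat_count], tokens[location][1]))
--             if not start_repeat == -1:
--                 repeat_max_count = len(bindings[token[0][1:]])
--             location += 1
--         elif token[1] == "(":
--             start_repeat = location + 1
--             location += 1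
--         elif token[1] == ")":
--             repeat_count += 1
--
--             if repeat_count == repeat_max_count:
--                 location += 1
--                 start_repeat = -1
--                 repeat_count = 0
--                 continue
--
--             location = start_repeat
--         else:
--             expanded.append(tokens[location])
--             location += 1
--
--     return expanded
-- ===== SOURCE B (Python) =====
-- def is_bind(t):
--     return bool(t[0]) and t[0][0] == '%'
--
-- def split_group(ts):
--     # tokens after a '(' : returns (group body, rest after the matching ')')
--     if not ts:
--         return [], []
--     u = ts[0]
--     if (not is_bind(u)) and u[1] == ')':
--         return [], ts[1:]
--     group, rest = split_group(ts[1:])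
--     return [u] + group, rest
--
-- def parse_units(ts):
--     # segment into units: ('tok', token) or ('group', [tokens between parens])
--     units = []
--     while ts:
--         t = ts[0]
--         if (not is_bind(t)) and t[1] == '(':
--             group, ts = split_group(ts[1:])
--             units.append(('group', group))
--         else:
--             units.append(('tok', t))
--             ts = ts[1:]
--     return units
--
-- def emit_token(bindings, t, c):
--     if is_bind(t):
--         return (bindings[t[0][1:]][c], t[1])
--     return t
--
-- def group_count(bindings, group):
--     last = None
--     for u in group:
--         if is_bind(u):
--             last = u[0][1:]
--     return len(bindings[last])
--
-- def expand_macro(tokens, macro_start, macro_end, bindings):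
--     if macro_end <= macro_start:
--         return []
--     out = []
--     for kind, val in parse_units(tokens[macro_start:macro_end]):
--         if kind == 'tok':
--             out.append(emit_token(bindings, val, 0))
--         else:
--             for c in range(group_count(bindings, val)):
--                 for u in val:
--                     out.append(emit_token(bindings, u, c))
--     return out
-- ===== Notes on version B (the rewrite author's own statement) =====
-- stated objective: simpler
-- what changed: A walks one cursor with mutable start_repeat/repeat_count/repeat_max_count state and jumps the cursor backwards to re-run repeat groups; B first segments the macro range into units (single tokens and repeat-group bodies) and then emits each unit independently, re-emitting a group body count-many times with a plain for-range, so no backward jumps and no cross-token mutable state.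
-- outside the precondition, e.g. on expand_macro([('a', 'x')], -1, 1, {}): A returns [('a', 'x'), ('a', 'x')], B returns [('a', 'x')]
import Mathlib
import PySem

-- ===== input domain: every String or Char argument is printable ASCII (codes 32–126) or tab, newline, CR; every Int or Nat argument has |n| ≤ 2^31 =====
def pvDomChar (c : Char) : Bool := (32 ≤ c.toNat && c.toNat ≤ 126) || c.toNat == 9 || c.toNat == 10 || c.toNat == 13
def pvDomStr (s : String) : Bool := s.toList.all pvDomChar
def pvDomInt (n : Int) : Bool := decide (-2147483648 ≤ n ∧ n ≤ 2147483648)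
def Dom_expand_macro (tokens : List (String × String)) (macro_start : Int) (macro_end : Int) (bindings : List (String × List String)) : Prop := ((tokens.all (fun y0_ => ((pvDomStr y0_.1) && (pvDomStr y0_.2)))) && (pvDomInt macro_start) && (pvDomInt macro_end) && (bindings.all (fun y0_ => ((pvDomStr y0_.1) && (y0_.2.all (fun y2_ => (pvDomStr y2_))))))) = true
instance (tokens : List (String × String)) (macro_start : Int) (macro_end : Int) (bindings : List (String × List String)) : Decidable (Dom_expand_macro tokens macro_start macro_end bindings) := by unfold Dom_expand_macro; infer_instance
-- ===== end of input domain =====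

-- B rewrites A's single-cursor loop with back-jumps as a two-phase decomposition (segment the range
-- into literal/binding/repeat-group units, then emit each unit); same asymptotic cost, simpler structure.

-- shared low-level helpers (Python-exact): 'token[0] and token[0][0] == %', 'token[0][1:]',
-- and the lookup 'bindings[name]' on the association list (first match; default only where Python raises)
def isBind (t : String × String) : Bool :=
  match t.1.toList with
  | [] => false
  | c :: _ => c == '%'

def bindName (t : String × String) : String := String.ofList (t.1.toList.drop 1)

def bLookup (bindings : List (String × List String)) (name : String) : List String :=
  ((bindings.find? (fun p => p.1 == name)).map (fun p => p.2)).getD []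

-- ===== PORT A =====
-- the while loop of A, fuel-bounded for totality only (state: expanded, location, start_repeat, repeat_count, repeat_max_count)
def expandLoop (tokens : List (String × String)) (macro_end : Int) (bindings : List (String × List String)) :
    Nat → List (String × String) → Int → Int → Int → Int → List (String × String)
  | 0, expanded, _, _, _, _ => expanded
  | fuel+1, expanded, location, start_repeat, repeat_count, repeat_max_count =>
    if location < macro_end then
      let token := (PySem.List.pyGet? tokens location).getD ("", "")
      if isBind token then
        let vals := bLookup bindings (bindName token)
        expandLoop tokens macro_end bindings fuel
          (expanded ++ [((PySem.List.pyGet? vals repeat_count).getD "", token.2)])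
          (location + 1) start_repeat repeat_count
          (if ¬ start_repeat = -1 then (vals.length : Int) else repeat_max_count)
      else if token.2 = "(" then
        expandLoop tokens macro_end bindings fuel expanded (location + 1) (location + 1) repeat_count repeat_max_count
      else if token.2 = ")" then
        if repeat_count + 1 = repeat_max_count then
          expandLoop tokens macro_end bindings fuel expanded (location + 1) (-1) 0 repeat_max_count
        else
          expandLoop tokens macro_end bindings fuel expanded start_repeat start_repeat (repeat_count + 1) repeat_max_count
      else
        expandLoop tokens macro_end bindings fuel (expanded ++ [token]) (location + 1) start_repeat repeat_count repeat_max_count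
    else expanded

def sumLens (bindings : List (String × List String)) : Nat := (bindings.map (fun p => p.2.length)).sum

def expand_macro (tokens : List (String × String)) (macro_start : Int) (macro_end : Int) (bindings : List (String × List String)) : List (String × String) :=
  expandLoop tokens macro_end bindings
    (((macro_end - macro_start).toNat + 1) * (sumLens bindings + 2))
    [] macro_start (-1) 0 (-1)

-- ===== PORT B =====
-- split_group: tokens after a '(' → (group body, rest after the matching ')')
def splitGroup : List (String × String) → List (String × String) × List (String × String)
  | [] => ([], [])
  | u :: rest =>
    if isBind u = false ∧ u.2 = ")" then ([], rest)
    else (u :: (splitGroup rest).1, (splitGroup rest).2)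

theorem splitGroup_length_le (ts : List (String × String)) : (splitGroup ts).2.length ≤ ts.length := by
  induction ts with
  | nil => simp [splitGroup]
  | cons u rest ih =>
    simp only [splitGroup]
    split
    · simp
    · simpa using Nat.le_succ_of_le ih

-- parse_units: segment into units (inl = single token, inr = repeat-group body)
def parseUnits : List (String × String) → List ((String × String) ⊕ List (String × String))
  | [] => []
  | t :: rest =>
    if isBind t = false ∧ t.2 = "(" then
      Sum.inr (splitGroup rest).1 :: parseUnits (splitGroup rest).2
    else
      Sum.inl t :: parseUnits rest
  termination_by ts => ts.length
  decreasing_by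
  · simpa using Nat.lt_succ_of_le (splitGroup_length_le rest)
  · simp

def emitTok (bindings : List (String × List String)) (t : String × String) (c : Int) : String × String :=
  if isBind t then ((PySem.List.pyGet? (bLookup bindings (bindName t)) c).getD "", t.2) else t

-- group_count: length of bindings[last binding name in the group]
def groupCount (bindings : List (String × List String)) (g : List (String × String)) : Nat :=
  (bLookup bindings
    ((g.foldl (fun last u => if isBind u then some (bindName u) else last) none).getD "")).length

def emitUnit (bindings : List (String × List String)) :
    ((String × String) ⊕ List (String × String)) → List (String × String)
  | Sum.inl t => [emitTok bindings t 0]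
  | Sum.inr g => (List.range (groupCount bindings g)).flatMap (fun (c : Nat) => g.map (fun u => emitTok bindings u (c : Int)))

def expand_macro_alt (tokens : List (String × String)) (macro_start : Int) (macro_end : Int) (bindings : List (String × List String)) : List (String × String) :=
  if macro_end ≤ macro_start then []
  else (parseUnits (PySem.List.slice tokens (some macro_start) (some macro_end))).flatMap (emitUnit bindings)

-- ===== PRECONDITION & SPEC =====
-- closed-form well-formedness of the macro segment, checked by one structural scan:
-- top level: every binding name present and non-empty, no stray ')';
-- inside '( … )': no nested '(', a ')' is reached, the group has a binding, and with
-- n = length of bindings[last binding in the group]: n ≥ 1 and every group binding has ≥ n values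
def firstBindName (l : List (String × String)) : Option String :=
  (l.find? isBind).map bindName

def groupOkRev (bindings : List (String × List String)) (acc : List (String × String)) : Bool :=
  match firstBindName acc with
  | none => false
  | some nm =>
    decide (1 ≤ (bLookup bindings nm).length) &&
    acc.all (fun u => !isBind u ||
      ((bindings.find? (fun p => p.1 == bindName u)).isSome &&
       decide ((bLookup bindings nm).length ≤ (bLookup bindings (bindName u)).length)))

def wfScan (bindings : List (String × List String)) :
    List (String × String) → Option (List (String × String)) → Bool
  | [], o => o.isNone
  | t :: rest, none =>
    if isBind t then
      ((bindings.find? (fun p => p.1 == bindName t)).isSome &&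
       decide (1 ≤ (bLookup bindings (bindName t)).length)) &&
      wfScan bindings rest none
    else if t.2 = "(" then wfScan bindings rest (some [])
    else if t.2 = ")" then false
    else wfScan bindings rest none
  | t :: rest, some acc =>
    if isBind t then wfScan bindings rest (some (t :: acc))
    else if t.2 = "(" then false
    else if t.2 = ")" then groupOkRev bindings acc && wfScan bindings rest none
    else wfScan bindings rest (some (t :: acc))

-- Pre_ restricts to the natural domain of the function: a genuine in-range macro window (or an empty
-- window) whose content is a well-formed macro body; outside it A raises (KeyError/IndexError on
-- missing or too-short bindings), loops forever (bindingless group, stray ')'), or returns an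
-- accident of its cursor state (negative-start index wraparound, unmatched '(' inside a group).
def Pre_expand_macro (tokens : List (String × String)) (macro_start : Int) (macro_end : Int) (bindings : List (String × List String)) : Prop :=
  macro_end ≤ macro_start ∨
  (0 ≤ macro_start ∧ macro_end ≤ (tokens.length : Int) ∧
   wfScan bindings ((tokens.drop macro_start.toNat).take (macro_end - macro_start).toNat) none = true)

instance (tokens : List (String × String)) (macro_start : Int) (macro_end : Int) (bindings : List (String × List String)) : Decidable (Pre_expand_macro tokens macro_start macro_end bindings) := by unfold Pre_expand_macro; infer_instance

def pvWitness_expand_macro : (List (String × String)) × Int × Int × (List (String × List String)) :=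
  ([("fn", "id"), ("", "("), ("%x", "id"), (",", "sym"), ("", ")")], 0, 5, [("x", ["a", "b"])])

def Spec_expand_macro (tokens : List (String × String)) (macro_start : Int) (macro_end : Int) (bindings : List (String × List String)) (out : List (String × String)) : Prop := out = expand_macro_alt tokens macro_start macro_end bindings
instance (tokens : List (String × String)) (macro_start : Int) (macro_end : Int) (bindings : List (String × List String)) (out : List (String × String)) : Decidable (Spec_expand_macro tokens macro_start macro_end bindings out) := by unfold Spec_expand_macro; infer_instance

-- ===== CLAIM (what is proved, stated in full; the proofs are below) =====
def Claim_equal_expand_macro : Prop := ∀ (tokens : List (String × String)) (macro_start : Int) (macro_end : Int) (bindings : List (String × List String)), Dom_expand_macro tokens macro_start macro_end bindings → Pre_expand_macro tokens macro_start macro_end bindings → Spec_expand_macro tokens macro_start macro_end bindings (expand_macro tokens macro_start macro_end bindings)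


-- ===== LEMMAS AND PROOFS =====

-- proof-side well-formedness, phrased along split_group (equivalent to the scanned Pre_, bridged below)
-- a repeat-group body is usable: it has a binding (else A never terminates), no nested '(',
-- all its binding names are present and long enough (index < count, else A raises), count ≥ 1
def groupOkB (bindings : List (String × List String)) (g : List (String × String)) : Bool :=
  g.any isBind &&
  g.all (fun u => isBind u || !(u.2 == "(")) &&
  decide (1 ≤ groupCount bindings g) &&
  g.all (fun u => !isBind u ||
    ((bindings.find? (fun p => p.1 == bindName u)).isSome &&
     decide (groupCount bindings g ≤ (bLookup bindings (bindName u)).length)))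

-- well-formed macro segment: bindings present and non-empty, every '(' matched by a ')',
-- groups usable, no stray top-level ')'
def wfSeg (bindings : List (String × List String)) : List (String × String) → Bool
  | [] => true
  | t :: rest =>
    if isBind t then
      ((bindings.find? (fun p => p.1 == bindName t)).isSome &&
       decide (1 ≤ (bLookup bindings (bindName t)).length)) &&
      wfSeg bindings rest
    else if t.2 = "(" then
      rest.any (fun u => !isBind u && u.2 == ")") &&
      groupOkB bindings (splitGroup rest).1 &&
      wfSeg bindings (splitGroup rest).2
    else if t.2 = ")" then false
    else wfSeg bindings rest
  termination_by ts => ts.length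
  decreasing_by
  · simp
  · simpa using Nat.lt_succ_of_le (splitGroup_length_le rest)
  · simp


-- segment bookkeeping for the cursor walk
theorem seg_cons {α : Type} (xs : List α) (j M : Nat) (u : α) (l : List α)
    (h : (xs.drop j).take M = u :: l) :
    xs[j]? = some u ∧ (xs.drop (j+1)).take (M-1) = l ∧ 1 ≤ M ∧ j < xs.length := by
  cases hd : xs.drop j with
  | nil => rw [hd] at h; simp at h
  | cons a t =>
    rw [hd] at h
    cases M with
    | zero => simp at h
    | succ m =>
      rw [List.take_succ_cons] at h
      obtain ⟨rfl, rfl⟩ := List.cons.inj h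
      have hj : j < xs.length := by
        by_contra hc
        rw [List.drop_eq_nil_of_le (by omega)] at hd; simp at hd
      refine ⟨?_, ?_, by omega, hj⟩
      · have : xs[j]? = (xs.drop j)[0]? := by simp [List.getElem?_drop]
        rw [this, hd]; rfl
      · have : xs.drop (j+1) = (xs.drop j).drop 1 := by rw [List.drop_drop]
        rw [this, hd]; simp

theorem seg_append {α : Type} (xs : List α) (j M : Nat) (l1 l2 : List α)
    (h : (xs.drop j).take M = l1 ++ l2) :
    (xs.drop (j + l1.length)).take (M - l1.length) = l2 := by
  induction l1 generalizing j M with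
  | nil => simpa using h
  | cons a t ih =>
    obtain ⟨_, h2, _, _⟩ := seg_cons xs j M a (t ++ l2) (by simpa using h)
    have := ih (j+1) (M-1) h2
    rw [List.length_cons, show j + (t.length + 1) = j + 1 + t.length by omega,
      show M - (t.length + 1) = M - 1 - t.length by omega]
    exact this

-- one-step unfoldings of A's while loop
theorem expandLoop_stop (tks : List (String × String)) (N : Int) (bs : List (String × List String))
    (fuel : Nat) (exp : List (String × String)) (loc sr rc rmc : Int) (h : ¬ loc < N) :
    expandLoop tks N bs fuel exp loc sr rc rmc = exp := by
  cases fuel <;> simp [expandLoop, h]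

theorem expandLoop_bind (tks : List (String × String)) (N : Int) (bs : List (String × List String))
    (fuel : Nat) (exp : List (String × String)) (loc sr rc rmc : Int) (t : String × String)
    (hlt : loc < N) (ht : PySem.List.pyGet? tks loc = some t) (hb : isBind t = true) :
    expandLoop tks N bs (fuel+1) exp loc sr rc rmc =
      expandLoop tks N bs fuel
        (exp ++ [((PySem.List.pyGet? (bLookup bs (bindName t)) rc).getD "", t.2)])
        (loc + 1) sr rc
        (if ¬ sr = -1 then ((bLookup bs (bindName t)).length : Int) else rmc) := by
  simp [expandLoop, hlt, ht, hb]

theorem expandLoop_open (tks : List (String × String)) (N : Int) (bs : List (String × List String))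
    (fuel : Nat) (exp : List (String × String)) (loc sr rc rmc : Int) (t : String × String)
    (hlt : loc < N) (ht : PySem.List.pyGet? tks loc = some t) (hb : isBind t = false) (h2 : t.2 = "(") :
    expandLoop tks N bs (fuel+1) exp loc sr rc rmc =
      expandLoop tks N bs fuel exp (loc + 1) (loc + 1) rc rmc := by
  simp [expandLoop, hlt, ht, hb, h2]

theorem expandLoop_close (tks : List (String × String)) (N : Int) (bs : List (String × List String))
    (fuel : Nat) (exp : List (String × String)) (loc sr rc rmc : Int) (t : String × String)
    (hlt : loc < N) (ht : PySem.List.pyGet? tks loc = some t) (hb : isBind t = false) (h2 : t.2 = ")") :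
    expandLoop tks N bs (fuel+1) exp loc sr rc rmc =
      (if rc + 1 = rmc then expandLoop tks N bs fuel exp (loc + 1) (-1) 0 rmc
       else expandLoop tks N bs fuel exp sr sr (rc + 1) rmc) := by
  have hne : ¬ t.2 = "(" := by rw [h2]; decide
  simp [expandLoop, hlt, ht, hb, h2]

theorem expandLoop_lit (tks : List (String × String)) (N : Int) (bs : List (String × List String))
    (fuel : Nat) (exp : List (String × String)) (loc sr rc rmc : Int) (t : String × String)
    (hlt : loc < N) (ht : PySem.List.pyGet? tks loc = some t) (hb : isBind t = false)
    (h2 : ¬ t.2 = "(") (h3 : ¬ t.2 = ")") :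
    expandLoop tks N bs (fuel+1) exp loc sr rc rmc =
      expandLoop tks N bs fuel (exp ++ [t]) (loc + 1) sr rc rmc := by
  simp [expandLoop, hlt, ht, hb, h2, h3]

-- the split produced by split_group is the group body up to the first closing token
theorem splitGroup_spec (rest : List (String × String))
    (h : rest.any (fun u => !isBind u && u.2 == ")") = true) :
    ∃ cl, rest = (splitGroup rest).1 ++ cl :: (splitGroup rest).2 ∧ isBind cl = false ∧ cl.2 = ")" ∧
      ∀ u ∈ (splitGroup rest).1, isBind u = true ∨ ¬ u.2 = ")" := by
  induction rest with
  | nil => simp at h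
  | cons u rest ih =>
    by_cases hc : isBind u = false ∧ u.2 = ")"
    · refine ⟨u, ?_, hc.1, hc.2, ?_⟩ <;> simp [splitGroup, hc]
    · have h' : rest.any (fun u => !isBind u && u.2 == ")") = true := by
        rcases List.any_eq_true.mp h with ⟨v, hv, hvp⟩
        rcases List.mem_cons.mp hv with rfl | hv'
        · exfalso; apply hc
          cases hb : isBind v <;> simp [hb] at hvp ⊢
          exact hvp
        · exact List.any_eq_true.mpr ⟨v, hv', hvp⟩
      obtain ⟨cl, he, h1, h2, h3⟩ := ih h'
      refine ⟨cl, ?_, h1, h2, ?_⟩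
      · simp only [splitGroup, if_neg hc]
        simpa using he
      · intro v hv
        simp only [splitGroup, if_neg hc] at hv
        rcases List.mem_cons.mp hv with rfl | hv'
        · by_cases hbv : isBind v = true
          · exact Or.inl hbv
          · refine Or.inr ?_
            intro h2v
            exact hc ⟨by simpa using hbv, h2v⟩
        · exact h3 v hv'

-- the running repeat_max_count after walking a group equals (groupCount) once a binding has been seen
theorem foldl_rmc_aux (bs : List (String × List String)) :
    ∀ (g : List (String × String)) (o : Option String) (rmc : Int),
    (g.any isBind = true ∨ ∃ nm, o = some nm ∧ rmc = ((bLookup bs nm).length : Int)) →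
    g.foldl (fun m u => if isBind u then ((bLookup bs (bindName u)).length : Int) else m) rmc =
      ((bLookup bs ((g.foldl (fun last u => if isBind u then some (bindName u) else last) o).getD "")).length : Int) := by
  intro g
  induction g with
  | nil =>
    intro o rmc h
    rcases h with h | ⟨nm, rfl, rfl⟩
    · simp at h
    · simp
  | cons u g ih =>
    intro o rmc h
    by_cases hb : isBind u = true
    · simp only [List.foldl_cons, if_pos hb]
      exact ih (some (bindName u)) _ (Or.inr ⟨bindName u, rfl, rfl⟩)
    · simp only [List.foldl_cons, if_neg hb]
      apply ih
      rcases h with h | hr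
      · rcases List.any_eq_true.mp h with ⟨v, hv, hvb⟩
        rcases List.mem_cons.mp hv with rfl | hv'
        · exact absurd hvb hb
        · exact Or.inl (List.any_eq_true.mpr ⟨v, hv', hvb⟩)
      · exact Or.inr hr

theorem foldl_rmc (bs : List (String × List String)) (g : List (String × String)) (rmc : Int)
    (h : g.any isBind = true) :
    g.foldl (fun m u => if isBind u then ((bLookup bs (bindName u)).length : Int) else m) rmc =
      (groupCount bs g : Int) :=
  foldl_rmc_aux bs g none rmc (Or.inl h)



-- walking one pass over the group body: each token emits with the current repeat_count,
-- repeat_max_count tracks the last binding seen (start_repeat ≠ -1 inside a group)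
theorem passWalk (tks : List (String × String)) (N : Int) (bs : List (String × List String))
    (g : List (String × String)) :
    ∀ (j M : Nat) (fuel : Nat) (exp : List (String × String)) (sr rc rmc : Int)
      (tail : List (String × String)),
    (tks.drop j).take M = g ++ tail →
    (j : Int) + g.length ≤ N →
    ¬ sr = -1 →
    (∀ u ∈ g, isBind u = true ∨ (¬ u.2 = "(" ∧ ¬ u.2 = ")")) →
    expandLoop tks N bs (fuel + g.length) exp (j : Int) sr rc rmc =
      expandLoop tks N bs fuel (exp ++ g.map (fun u => emitTok bs u rc)) ((j : Int) + g.length) sr rc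
        (g.foldl (fun m u => if isBind u then ((bLookup bs (bindName u)).length : Int) else m) rmc) := by
  induction g with
  | nil => intro j M fuel exp sr rc rmc tail _ _ _ _; simp
  | cons u g ih =>
    intro j M fuel exp sr rc rmc tail hseg hend hsr hg
    obtain ⟨hj, hseg', _, _⟩ := seg_cons tks j M u (g ++ tail) (by simpa using hseg)
    have hjget : PySem.List.pyGet? tks ((j : Nat) : Int) = some u := by
      rw [PySem.List.pyGet?_natCast]; exact hj
    have hlt : (j : Int) < N := by
      have : (0 : Int) ≤ g.length := by positivity
      simp only [List.length_cons] at hend; push_cast at hend ⊢; omega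
    have hfl : fuel + (u :: g).length = (fuel + g.length) + 1 := by simp; omega
    rw [hfl]
    by_cases hbu : isBind u = true
    · rw [expandLoop_bind tks N bs (fuel + g.length) exp _ sr rc rmc u hlt hjget hbu]
      rw [if_pos hsr]
      have := ih (j+1) (M-1) fuel
        (exp ++ [((PySem.List.pyGet? (bLookup bs (bindName u)) rc).getD "", u.2)]) sr rc
        ((bLookup bs (bindName u)).length : Int) tail hseg'
        (by simp only [List.length_cons] at hend; push_cast at hend; omega) hsr
        (fun v hv => hg v (List.mem_cons_of_mem u hv))
      rw [show ((j:Int) + 1) = (((j+1 : Nat)) : Int) by push_cast; ring] at *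
      rw [this]
      congr 1
      · simp [emitTok, hbu]
      · simp; ring
      · simp [hbu]
    · have hb : isBind u = false := by simpa using hbu
      have hlits : ¬ u.2 = "(" ∧ ¬ u.2 = ")" := by
        rcases hg u (List.mem_cons_self) with h | h
        · exact absurd h hbu
        · exact h
      rw [expandLoop_lit tks N bs (fuel + g.length) exp _ sr rc rmc u hlt hjget hb hlits.1 hlits.2]
      have := ih (j+1) (M-1) fuel (exp ++ [u]) sr rc rmc tail hseg'
        (by simp only [List.length_cons] at hend; push_cast at hend; omega) hsr
        (fun v hv => hg v (List.mem_cons_of_mem u hv))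
      rw [show ((j:Int) + 1) = (((j+1 : Nat)) : Int) by push_cast; ring] at *
      rw [this]
      congr 1
      · simp [emitTok, hb]
      · simp; ring
      · simp [hb]


-- one full pass over 'g )': emit, bump repeat_count, loop back or exit the group
theorem groupPass (tks : List (String × String)) (N : Int) (bs : List (String × List String))
    (g : List (String × String)) (j M : Nat) (cl : String × String) (tail : List (String × String))
    (n : Nat)
    (hseg : (tks.drop j).take M = g ++ cl :: tail)
    (hcl1 : isBind cl = false) (hcl2 : cl.2 = ")")
    (hend : (j : Int) + g.length < N)
    (hg : ∀ u ∈ g, isBind u = true ∨ (¬ u.2 = "(" ∧ ¬ u.2 = ")"))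
    (hany : g.any isBind = true)
    (hn : n = groupCount bs g)
    (r : Nat) (fuel : Nat) (exp : List (String × String)) (rmc : Int) :
    expandLoop tks N bs (fuel + (g.length + 1)) exp (j : Int) (j : Int) (r : Int) rmc =
      if r + 1 = n then
        expandLoop tks N bs fuel (exp ++ g.map (fun u => emitTok bs u (r : Int)))
          ((j : Int) + g.length + 1) (-1) 0 (n : Int)
      else
        expandLoop tks N bs fuel (exp ++ g.map (fun u => emitTok bs u (r : Int)))
          (j : Int) (j : Int) ((r : Int) + 1) (n : Int) := by
  have hsr : ¬ (j : Int) = -1 := by omega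
  rw [show fuel + (g.length + 1) = (fuel + 1) + g.length by omega]
  rw [passWalk tks N bs g j M (fuel + 1) exp (j : Int) (r : Int) rmc (cl :: tail) hseg
    (le_of_lt hend) hsr hg]
  rw [foldl_rmc bs g rmc hany, ← hn]
  have hclget : PySem.List.pyGet? tks ((j : Int) + g.length) = some cl := by
    obtain ⟨hc, _, _, _⟩ := seg_cons tks (j + g.length) (M - g.length) cl tail
      (seg_append tks j M g (cl :: tail) hseg)
    rw [show ((j : Int) + g.length) = (((j + g.length : Nat)) : Int) by push_cast; ring,
      PySem.List.pyGet?_natCast]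
    exact hc
  rw [expandLoop_close tks N bs fuel _ _ _ _ _ cl hend hclget hcl1 hcl2]
  by_cases hc : r + 1 = n
  · rw [if_pos (by exact_mod_cast congrArg (Nat.cast : Nat → Int) hc), if_pos hc]
  · rw [if_neg (by intro h; exact hc (by exact_mod_cast h)), if_neg hc]

-- the passes r, r+1, …, n-1 of a repeat group, then exit past the ')'
theorem groupLoop (tks : List (String × String)) (N : Int) (bs : List (String × List String))
    (g : List (String × String)) (j M : Nat) (cl : String × String) (tail : List (String × String))
    (n : Nat)
    (hseg : (tks.drop j).take M = g ++ cl :: tail)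
    (hcl1 : isBind cl = false) (hcl2 : cl.2 = ")")
    (hend : (j : Int) + g.length < N)
    (hg : ∀ u ∈ g, isBind u = true ∨ (¬ u.2 = "(" ∧ ¬ u.2 = ")"))
    (hany : g.any isBind = true)
    (hn : n = groupCount bs g) :
    ∀ (k r : Nat), 1 ≤ k → r + k = n → ∀ (fuel : Nat) (exp : List (String × String)) (rmc : Int),
    expandLoop tks N bs (fuel + k * (g.length + 1)) exp (j : Int) (j : Int) (r : Int) rmc =
      expandLoop tks N bs fuel
        (exp ++ (List.range' r k).flatMap (fun (c : Nat) => g.map (fun u => emitTok bs u (c : Int))))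
        ((j : Int) + g.length + 1) (-1) 0 (n : Int) := by
  intro k
  induction k with
  | zero => intro r h1; omega
  | succ k ih =>
    intro r _ hrk fuel exp rmc
    rw [show fuel + (k + 1) * (g.length + 1) = (fuel + k * (g.length + 1)) + (g.length + 1) by ring]
    rw [groupPass tks N bs g j M cl tail n hseg hcl1 hcl2 hend hg hany hn r _ exp rmc]
    rcases Nat.eq_zero_or_pos k with rfl | hk
    · rw [if_pos (by omega)]
      simp
    · rw [if_neg (by omega)]
      rw [show ((r : Int) + 1) = (((r + 1 : Nat)) : Int) by push_cast; ring]
      rw [ih (r + 1) hk (by omega) fuel (exp ++ g.map (fun u => emitTok bs u (r : Int))) (n : Int)]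
      congr 1
      rw [List.range'_succ, List.flatMap_cons, List.append_assoc]


-- exact number of loop iterations A needs on a well-formed segment
def cost (bs : List (String × List String)) : List (String × String) → Nat
  | [] => 0
  | t :: rest =>
    if isBind t = false ∧ t.2 = "(" then
      groupCount bs (splitGroup rest).1 * ((splitGroup rest).1.length + 1) + 1 + cost bs (splitGroup rest).2
    else 1 + cost bs rest
  termination_by ts => ts.length
  decreasing_by
  · simpa using Nat.lt_succ_of_le (splitGroup_length_le rest)
  · simp

-- the main loop of A, started at j with a well-formed remaining segment, produces B's emission
theorem mainLoop (tks : List (String × String)) (bs : List (String × List String)) (N : Int) :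
    ∀ (M j fuel : Nat) (exp : List (String × String)) (rmc : Int),
    j + M ≤ tks.length → N = (j : Int) + M →
    wfSeg bs ((tks.drop j).take M) = true →
    expandLoop tks N bs (fuel + cost bs ((tks.drop j).take M)) exp (j : Int) (-1) 0 rmc =
      exp ++ (parseUnits ((tks.drop j).take M)).flatMap (emitUnit bs) := by
  intro M
  induction M using Nat.strong_induction_on with
  | _ M ih =>
    intro j fuel exp rmc hlen hN hwf
    cases hseg : (tks.drop j).take M with
    | nil =>
      have hM : M = 0 := by
        by_contra hM
        have hj : j < tks.length := by omega
        cases hd : tks.drop j with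
        | nil => rw [List.drop_eq_nil_iff] at hd; omega
        | cons a tl =>
          rw [hd] at hseg
          cases M with
          | zero => omega
          | succ m => rw [List.take_succ_cons] at hseg; simp at hseg
      rw [cost, parseUnits, expandLoop_stop tks N bs _ exp _ _ _ _ (by omega)]
      simp
    | cons t rest_seg =>
      obtain ⟨hjget0, hseg', hM1, hjlt⟩ := seg_cons tks j M t rest_seg hseg
      have hjget : PySem.List.pyGet? tks ((j : Nat) : Int) = some t := by
        rw [PySem.List.pyGet?_natCast]; exact hjget0
      have hlt : (j : Int) < N := by rw [hN]; omega
      rw [hseg] at hwf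
      by_cases hb : isBind t = true
      · -- top-level binding token: appended with repeat_count 0
        rw [wfSeg, if_pos hb] at hwf
        rw [Bool.and_eq_true] at hwf
        obtain ⟨-, hwf'⟩ := hwf
        rw [cost, if_neg (by simp [hb]), parseUnits, if_neg (by simp [hb])]
        rw [show fuel + (1 + cost bs rest_seg) = (fuel + cost bs rest_seg) + 1 by omega]
        rw [expandLoop_bind tks N bs _ exp _ (-1) 0 rmc t hlt hjget hb, if_neg (by simp)]
        rw [show ((j : Int) + 1) = (((j + 1 : Nat)) : Int) by push_cast; ring]
        have := ih (M - 1) (by omega) (j + 1) fuel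
          (exp ++ [((PySem.List.pyGet? (bLookup bs (bindName t)) 0).getD "", t.2)]) rmc
          (by omega) (by push_cast at hN ⊢; omega) (by rw [hseg']; exact hwf')
        rw [hseg'] at this
        rw [this, List.flatMap_cons]
        simp [emitUnit, emitTok, hb]
      · have hbf : isBind t = false := by simpa using hb
        by_cases h2 : t.2 = "("
        · -- a repeat group
          rw [wfSeg, if_neg (by simp [hbf]), if_pos h2] at hwf
          rw [Bool.and_eq_true, Bool.and_eq_true] at hwf
          obtain ⟨⟨hanyc, hgOk⟩, hwf'⟩ := hwf
          obtain ⟨cl, hdecomp, hcl1, hcl2, hnoclose⟩ := splitGroup_spec rest_seg hanyc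
          unfold groupOkB at hgOk
          rw [Bool.and_eq_true, Bool.and_eq_true, Bool.and_eq_true] at hgOk
          obtain ⟨⟨⟨hanyb, hnoopen⟩, hgOk4⟩, hgOk2⟩ := hgOk
          have hn1 : 1 ≤ groupCount bs (splitGroup rest_seg).1 := by
            simpa using of_decide_eq_true hgOk4
          have hg : ∀ u ∈ (splitGroup rest_seg).1,
              isBind u = true ∨ (¬ u.2 = "(" ∧ ¬ u.2 = ")") := by
            intro u hu
            by_cases hbu : isBind u = true
            · exact Or.inl hbu
            · refine Or.inr ⟨?cca, ?ccb⟩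
              case cca =>
                have := List.all_eq_true.mp hnoopen u hu
                simp [hbu] at this
                simpa using this
              case ccb =>
                rcases hnoclose u hu with h | h
                · exact absurd h hbu
                · exact h
          set g := (splitGroup rest_seg).1 with hgdef
          set rest' := (splitGroup rest_seg).2 with hrdef
          set n := groupCount bs g with hndef
          have hseg'' : (tks.drop (j + 1)).take (M - 1) = g ++ cl :: rest' := by
            rw [hseg']; exact hdecomp
          have hlensum : g.length + 1 + rest'.length ≤ M - 1 := by
            have h1 : ((tks.drop (j + 1)).take (M - 1)).length ≤ M - 1 := List.length_take_le _ _
            rw [hseg''] at h1; simp at h1; omega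
          have hMge : g.length + 2 ≤ M := by omega
          rw [cost, if_pos ⟨hbf, h2⟩, parseUnits, if_pos ⟨hbf, h2⟩]
          rw [show fuel + (groupCount bs (splitGroup rest_seg).1 * ((splitGroup rest_seg).1.length + 1) + 1 + cost bs (splitGroup rest_seg).2)
              = (((fuel + cost bs (splitGroup rest_seg).2) + groupCount bs (splitGroup rest_seg).1 * ((splitGroup rest_seg).1.length + 1)) + 1) by omega]
          rw [expandLoop_open tks N bs _ exp _ (-1) 0 rmc t hlt hjget hbf h2]
          rw [show ((j : Int) + 1) = (((j + 1 : Nat)) : Int) by push_cast; ring]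
          have hend : ((j + 1 : Nat) : Int) + g.length < N := by
            rw [hN]; push_cast; omega
          have hGL := groupLoop tks N bs g (j + 1) (M - 1) cl rest' n hseg'' hcl1 hcl2 hend hg
            hanyb rfl n 0 hn1 (by omega) (fuel + cost bs rest') exp rmc
          simp only [Nat.cast_zero] at hGL
          simp only [← hgdef, ← hrdef, ← hndef]
          rw [hGL]
          have hrest' : (tks.drop (j + g.length + 2)).take (M - g.length - 2) = rest' := by
            have := seg_append tks (j + 1) (M - 1) (g ++ [cl]) rest'
              (by rw [hseg'']; simp)
            simpa [show j + 1 + (g.length + 1) = j + g.length + 2 by omega,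
              show M - 1 - (g.length + 1) = M - g.length - 2 by omega] using this
          have hih := ih (M - g.length - 2) (by omega) (j + g.length + 2) fuel
            (exp ++ (List.range' 0 n).flatMap (fun (c : Nat) => g.map (fun u => emitTok bs u (c : Int))))
            ((n : Nat) : Int) (by omega) (by push_cast at hN ⊢; omega)
            (by rw [hrest']; exact hwf')
          rw [hrest'] at hih
          rw [show (((j + 1 : Nat)) : Int) + g.length + 1 = (((j + g.length + 2 : Nat)) : Int) by push_cast; ring]
          rw [hih, List.flatMap_cons, emitUnit, List.range_eq_range', List.append_assoc]
        · by_cases h3 : t.2 = ")"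
          · rw [wfSeg, if_neg (by simp [hbf]), if_neg h2, if_pos h3] at hwf
            simp at hwf
          · -- plain literal token
            rw [wfSeg, if_neg (by simp [hbf]), if_neg h2, if_neg h3] at hwf
            rw [cost, if_neg (by tauto), parseUnits, if_neg (by tauto)]
            rw [show fuel + (1 + cost bs rest_seg) = (fuel + cost bs rest_seg) + 1 by omega]
            rw [expandLoop_lit tks N bs _ exp _ (-1) 0 rmc t hlt hjget hbf h2 h3]
            rw [show ((j : Int) + 1) = (((j + 1 : Nat)) : Int) by push_cast; ring]
            have := ih (M - 1) (by omega) (j + 1) fuel (exp ++ [t]) rmc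
              (by omega) (by push_cast at hN ⊢; omega) (by rw [hseg']; exact hwf)
            rw [hseg'] at this
            rw [this, List.flatMap_cons]
            simp [emitUnit, emitTok, hbf]


theorem bLookup_le_sumLens (bs : List (String × List String)) (nm : String) :
    (bLookup bs nm).length ≤ sumLens bs := by
  induction bs with
  | nil => simp [bLookup, sumLens]
  | cons p rest ih =>
    by_cases hp : p.1 == nm
    · simp [bLookup, sumLens, List.find?, hp]
    · have h1 : (bLookup (p :: rest) nm).length = (bLookup rest nm).length := by
        simp [bLookup, List.find?, hp]
      have h2 : sumLens (p :: rest) = p.2.length + sumLens rest := by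
        simp [sumLens]
      omega

theorem splitGroup_len_sum (ts : List (String × String)) :
    (splitGroup ts).1.length + (splitGroup ts).2.length ≤ ts.length := by
  induction ts with
  | nil => simp [splitGroup]
  | cons u rest ih =>
    simp only [splitGroup]
    split
    · simp
    · simp only [List.length_cons]; omega

theorem cost_le (bs : List (String × List String)) :
    ∀ (L : Nat) (seg : List (String × String)), seg.length ≤ L →
    cost bs seg ≤ (seg.length + 1) * (sumLens bs + 2) := by
  intro L
  induction L with
  | zero =>
    intro seg hL
    have h0 : seg = [] := List.length_eq_zero_iff.mp (by omega)
    subst h0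
    simp [cost]
  | succ L ih =>
    intro seg hL
    cases seg with
    | nil => simp [cost]
    | cons t rest =>
      rw [cost]
      split
      · have hsum := splitGroup_len_sum rest
        have hrec := ih (splitGroup rest).2 (by simp at hL; omega)
        have hn : groupCount bs (splitGroup rest).1 ≤ sumLens bs := bLookup_le_sumLens bs _
        have hlen : (t :: rest).length = rest.length + 1 := by simp
        have hmul : groupCount bs (splitGroup rest).1 * ((splitGroup rest).1.length + 1)
            ≤ sumLens bs * ((splitGroup rest).1.length + 1) :=
          Nat.mul_le_mul_right _ hn
        nlinarith [Nat.zero_le (sumLens bs), Nat.zero_le ((splitGroup rest).1.length)]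
      · have hrec := ih rest (by simp at hL; omega)
        have hlen : (t :: rest).length = rest.length + 1 := by simp
        nlinarith [Nat.zero_le (sumLens bs)]

-- ===== VERDICT (by name: the statement is the Claim_ definition above) =====
-- bridge: the one-pass scanner of Pre_ implies the split_group-phrased well-formedness
theorem firstBindName_append (a b : List (String × String)) :
    firstBindName (a ++ b) = (firstBindName a).or (firstBindName b) := by
  rw [firstBindName, firstBindName, firstBindName, List.find?_append]
  cases List.find? isBind a <;> simp

theorem foldl_lastBind (g : List (String × String)) :
    ∀ (o : Option String),
    g.foldl (fun last u => if isBind u then some (bindName u) else last) o =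
      (firstBindName g.reverse).or o := by
  induction g with
  | nil => intro o; simp [firstBindName]
  | cons u r ih =>
    intro o
    rw [List.foldl_cons, ih, List.reverse_cons, firstBindName_append]
    by_cases hb : isBind u <;> simp [firstBindName, List.find?, hb]

theorem firstBindName_any (l : List (String × String)) (nm : String)
    (h : firstBindName l = some nm) : l.any isBind = true := by
  cases hf : l.find? isBind with
  | none => rw [firstBindName, hf] at h; simp at h
  | some u => exact List.any_eq_true.mpr ⟨u, List.mem_of_find?_eq_some hf, List.find?_some hf⟩

theorem wfScan_group (bs : List (String × List String)) :
    ∀ (rest acc : List (String × String)),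
    wfScan bs rest (some acc) = true →
    (rest.any (fun u => !isBind u && u.2 == ")")) = true ∧
    groupOkRev bs ((splitGroup rest).1.reverse ++ acc) = true ∧
    ((splitGroup rest).1.all (fun u => isBind u || !(u.2 == "("))) = true ∧
    wfScan bs (splitGroup rest).2 none = true := by
  intro rest
  induction rest with
  | nil => intro acc h; simp [wfScan] at h
  | cons u rest ih =>
    intro acc h
    by_cases hb : isBind u = true
    · unfold wfScan at h; rw [if_pos hb] at h
      obtain ⟨hany, hok, hall, hrest⟩ := ih (u :: acc) h
      have hsp : splitGroup (u :: rest) = (u :: (splitGroup rest).1, (splitGroup rest).2) := by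
        simp [splitGroup, hb]
      rw [hsp]
      refine ⟨by simp [List.any_cons, hany], ?_, by simp [hb, hall], hrest⟩
      simpa [List.append_assoc] using hok
    · have hbf : isBind u = false := by simpa using hb
      by_cases h2 : u.2 = "("
      · unfold wfScan at h
        rw [if_neg (by simp [hbf]), if_pos h2] at h
        simp at h
      · by_cases h3 : u.2 = ")"
        · unfold wfScan at h
          rw [if_neg (by simp [hbf]), if_neg h2, if_pos h3, Bool.and_eq_true] at h
          obtain ⟨hok, hrest⟩ := h
          have hsp : splitGroup (u :: rest) = ([], rest) := by
            simp [splitGroup, hbf, h3]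
          rw [hsp]
          exact ⟨by simp [hbf, h3], by simpa using hok, by simp, hrest⟩
        · unfold wfScan at h
          rw [if_neg (by simp [hbf]), if_neg h2, if_neg h3] at h
          obtain ⟨hany, hok, hall, hrest⟩ := ih (u :: acc) h
          have hsp : splitGroup (u :: rest) = (u :: (splitGroup rest).1, (splitGroup rest).2) := by
            simp [splitGroup, h3]
          rw [hsp]
          refine ⟨by simp [List.any_cons, hany], ?_, by simp [hall, h2], hrest⟩
          simpa [List.append_assoc] using hok

theorem wfScan_wfSeg (bs : List (String × List String)) :
    ∀ (L : Nat) (seg : List (String × String)), seg.length ≤ L →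
    wfScan bs seg none = true → wfSeg bs seg = true := by
  intro L
  induction L with
  | zero =>
    intro seg hL h
    have h0 : seg = [] := List.length_eq_zero_iff.mp (by omega)
    subst h0
    simp [wfSeg]
  | succ L ih =>
    intro seg hL h
    cases seg with
    | nil => simp [wfSeg]
    | cons t rest =>
      by_cases hb : isBind t = true
      · unfold wfScan at h; rw [if_pos hb, Bool.and_eq_true] at h
        rw [wfSeg, if_pos hb, Bool.and_eq_true]
        exact ⟨h.1, ih rest (by simp at hL; omega) h.2⟩
      · have hbf : isBind t = false := by simpa using hb
        by_cases h2 : t.2 = "("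
        · unfold wfScan at h
          rw [if_neg (by simp [hbf]), if_pos h2] at h
          obtain ⟨hany, hok, hall, hrest⟩ := wfScan_group bs rest [] h
          rw [List.append_nil] at hok
          rw [wfSeg, if_neg (by simp [hbf]), if_pos h2, Bool.and_eq_true, Bool.and_eq_true]
          have hrec : wfSeg bs (splitGroup rest).2 = true := by
        
            have := splitGroup_len_sum rest
            exact ih (splitGroup rest).2 (by simp at hL; omega) hrest
          refine ⟨⟨hany, ?_⟩, hrec⟩
          -- groupOkRev on the reversed group body gives groupOkB
          unfold groupOkRev at hok
          cases hf : firstBindName (splitGroup rest).1.reverse with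
          | none => rw [hf] at hok; simp at hok
          | some nm =>
            rw [hf, Bool.and_eq_true] at hok
            obtain ⟨hn1, hlens⟩ := hok
            have hcnt : groupCount bs (splitGroup rest).1 = (bLookup bs nm).length := by
              unfold groupCount
              rw [foldl_lastBind, hf]
              rfl
            unfold groupOkB
            rw [Bool.and_eq_true, Bool.and_eq_true, Bool.and_eq_true]
            refine ⟨⟨⟨?_, hall⟩, ?_⟩, ?_⟩
            · rw [← List.any_reverse]
              exact firstBindName_any _ nm hf
            · rw [hcnt]; exact hn1
            · rw [← List.all_reverse]
              simpa [hcnt] using hlens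
        · by_cases h3 : t.2 = ")"
          · unfold wfScan at h
            rw [if_neg (by simp [hbf]), if_neg h2, if_pos h3] at h
            simp at h
          · unfold wfScan at h
            rw [if_neg (by simp [hbf]), if_neg h2, if_neg h3] at h
            rw [wfSeg, if_neg (by simp [hbf]), if_neg h2, if_neg h3]
            exact ih rest (by simp at hL; omega) h

theorem expand_macro_spec : Claim_equal_expand_macro := by
  intro tks ms me bs _ hpre
  unfold Spec_expand_macro expand_macro expand_macro_alt
  by_cases hle : me ≤ ms
  · rw [if_pos hle, expandLoop_stop _ _ _ _ _ _ _ _ _ (by omega)]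
  · rw [if_neg hle]
    rcases hpre with h | ⟨h0, hlen, hwf⟩
    · omega
    have hslice : PySem.List.slice tks (some ms) (some me) =
        (tks.drop ms.toNat).take (me - ms).toNat := by
      rw [PySem.List.slice_toNat tks h0 (by omega : (0:Int) ≤ me)]
      congr 1
      omega
    rw [hslice]
    have hseglen : ((tks.drop ms.toNat).take (me - ms).toNat).length ≤ (me - ms).toNat :=
      List.length_take_le _ _
    have hcost : cost bs ((tks.drop ms.toNat).take (me - ms).toNat)
        ≤ ((me - ms).toNat + 1) * (sumLens bs + 2) := by
      refine le_trans (cost_le bs _ _ le_rfl) ?_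
      exact Nat.mul_le_mul_right _ (by omega)
    rw [show ((me - ms).toNat + 1) * (sumLens bs + 2)
        = (((me - ms).toNat + 1) * (sumLens bs + 2)
            - cost bs ((tks.drop ms.toNat).take (me - ms).toNat))
          + cost bs ((tks.drop ms.toNat).take (me - ms).toNat) by omega]
    have hmain := mainLoop tks bs me ((me - ms).toNat) ms.toNat
      ((((me - ms).toNat + 1) * (sumLens bs + 2))
        - cost bs ((tks.drop ms.toNat).take (me - ms).toNat)) [] (-1)
      (by omega) (by omega) (wfScan_wfSeg bs _ _ le_rfl hwf)
    rw [show ((ms.toNat : Nat) : Int) = ms by omega] at hmain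
    rw [hmain]
    simp
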